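-- pv_equiv track=rewrite | github.com/zeyu-chen/25t1-comp9021-labs | Lab 5/Solutions/ex_3_sol.py | f3_3
-- ===== SOURCE A (Python) =====
-- def f3_3(L: list[list[list[int]]], n: int) -> tuple[list[list[int]], list[list[int]]]:
--     """
--     Processes a 3-level nested list structure based on specific conditions.
--
--     Returns a pair of lists of lists:
--     1. First list: For each L' in L with length >= n, collect all positive integers
--        from members of L' whose elements sum to a positive number.
--     2. Second list: For each L' in L with length >= n and for each L'' in L'
--        whose elements sum to a positive number, collect all positive integers from L''.
--
--     This implementation uses functional programming techniques with intermediate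
--     transformations for better structure and readability.
--
--     Args:
--         L: A list of lists of lists of integers
--         n: Minimum length requirement for sublists
--
--     Returns:
--         A tuple of two lists of lists of positive integers
--     """
--     # Helper function to get positive elements from a list
--     def get_positives(lst: list[int]) -> list[int]:
--         return [x for x in lst if x > 0]
--
--     # Helper function to check if a list sums to a positive number
--     def has_positive_sum(lst: list[int]) -> bool:
--         return sum(lst) > 0
--
--     # Filter L to only include sublists with length >= n
--     qualified_lists = [L1 for L1 in L if len(L1) >= n]
--
--     # For the first result, we process each qualified list
--     first_result = []
--     for L1 in qualified_lists:
--         # Collect all positive integers from sublists with positive sum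
--         all_positives = []
--         for L2 in L1:
--             if has_positive_sum(L2):
--                 all_positives.extend(get_positives(L2))
--         first_result.append(all_positives)
--
--     # For the second result, we create a separate list for each sublist with positive sum
--     second_result = []
--     for L1 in qualified_lists:
--         for L2 in L1:
--             if has_positive_sum(L2):
--                 second_result.append(get_positives(L2))
--
--     return (first_result, second_result)
-- ===== SOURCE B (Python) =====
-- def f3_3(L: list[list[list[int]]], n: int) -> tuple[list[list[int]], list[list[int]]]:
--     # Build the flat second result once, recording how many groups each
--     # qualified sublist contributed; then reconstruct first_result purely
--     # from second and those counts (segment slicing), never revisiting L.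
--     second, counts = [], []
--     for L1 in L:
--         if len(L1) >= n:
--             start = len(second)
--             for L2 in L1:
--                 if sum(L2) > 0:
--                     second.append([x for x in L2 if x > 0])
--             counts.append(len(second) - start)
--     first, rest = [], second
--     for c in counts:
--         chunk = []
--         for g in rest[:c]:
--             chunk.extend(g)
--         first.append(chunk)
--         rest = rest[c:]
--     return (first, second)
-- ===== Notes on version B (the rewrite author's own statement) =====
-- stated objective: alternative
-- what changed: B builds the flat second result once while recording per-qualified-sublist group counts, then reconstructs first_result by slicing second into segments of those counts and flattening each, instead of A's two independent passes over the filtered data.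
import Mathlib
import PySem

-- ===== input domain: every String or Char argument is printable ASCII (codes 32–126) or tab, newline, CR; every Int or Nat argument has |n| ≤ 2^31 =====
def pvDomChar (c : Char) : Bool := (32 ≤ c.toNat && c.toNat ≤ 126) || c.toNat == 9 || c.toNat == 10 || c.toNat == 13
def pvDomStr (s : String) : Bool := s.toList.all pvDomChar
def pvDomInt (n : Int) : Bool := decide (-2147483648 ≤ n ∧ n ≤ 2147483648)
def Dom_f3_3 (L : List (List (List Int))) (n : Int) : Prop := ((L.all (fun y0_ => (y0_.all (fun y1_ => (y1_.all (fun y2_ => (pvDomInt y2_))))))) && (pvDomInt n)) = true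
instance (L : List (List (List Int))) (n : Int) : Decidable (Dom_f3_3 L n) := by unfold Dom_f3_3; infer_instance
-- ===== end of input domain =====

-- B builds the flat second result once with per-qualified-sublist group counts and
-- reconstructs first_result by slicing second into those segments (objective: alternative).

-- ===== PORT A =====
def f3_3 (L : List (List (List Int))) (n : Int) : List (List Int) × List (List Int) :=
  let getPositives : List Int → List Int := fun lst => lst.filter (fun x => decide (0 < x))
  let qualified := L.filter (fun L1 => decide (n ≤ (L1.length : Int)))
  let first := qualified.foldl (fun acc L1 =>
      acc ++ [L1.foldl (fun ap L2 => if 0 < L2.sum then ap ++ getPositives L2 else ap) []]) []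
  let second := qualified.foldl (fun acc L1 =>
      L1.foldl (fun acc2 L2 => if 0 < L2.sum then acc2 ++ [getPositives L2] else acc2) acc) []
  (first, second)

-- ===== PORT B =====
def f3_3_alt (L : List (List (List Int))) (n : Int) : List (List Int) × List (List Int) :=
  -- pass 1: second (flat groups) and counts (groups contributed per qualified L1)
  let sc := L.foldl (fun (sc : List (List Int) × List Int) L1 =>
      if n ≤ (L1.length : Int) then
        let start := sc.1.length
        let second := L1.foldl (fun s L2 =>
            if 0 < L2.sum then s ++ [L2.filter (fun x => decide (0 < x))] else s) sc.1
        (second, sc.2 ++ [((second.length : Int) - (start : Int))])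
      else sc) ([], [])
  let second := sc.1
  -- pass 2: rebuild first from second by slicing off counts-sized segments
  let fr := sc.2.foldl (fun (fr : List (List Int) × List (List Int)) c =>
      let chunk := (PySem.List.slice fr.2 none (some c)).foldl (fun ch g => ch ++ g) []
      (fr.1 ++ [chunk], PySem.List.slice fr.2 (some c) none)) ([], second)
  (fr.1, second)

-- ===== PRECONDITION & SPEC =====
def Spec_f3_3 (L : List (List (List Int))) (n : Int) (out : List (List Int) × List (List Int)) : Prop := out = f3_3_alt L n
instance (L : List (List (List Int))) (n : Int) (out : List (List Int) × List (List Int)) : Decidable (Spec_f3_3 L n out) := by unfold Spec_f3_3; infer_instance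

-- ===== CLAIM =====
def Claim_equal_f3_3 : Prop := ∀ (L : List (List (List Int))) (n : Int), Dom_f3_3 L n → Spec_f3_3 L n (f3_3 L n)

-- ===== LEMMAS AND PROOFS =====

def pvGroups (L1 : List (List Int)) : List (List Int) :=
  (L1.filter (fun L2 => decide (0 < L2.sum))).map (fun L2 => L2.filter (fun x => decide (0 < x)))

theorem pv_inner_first (L1 : List (List Int)) (acc : List Int) :
    L1.foldl (fun ap L2 => if 0 < L2.sum then ap ++ L2.filter (fun x => decide (0 < x)) else ap) acc
      = acc ++ (pvGroups L1).flatten := by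
  induction L1 generalizing acc with
  | nil => simp [pvGroups]
  | cons h t ih =>
    rw [List.foldl_cons]
    by_cases hs : (0 : Int) < h.sum
    · rw [if_pos hs, ih]; simp [pvGroups, hs]
    · rw [if_neg hs, ih]; simp [pvGroups, hs]

theorem pv_inner_second (L1 : List (List Int)) (acc : List (List Int)) :
    L1.foldl (fun acc2 L2 => if 0 < L2.sum then acc2 ++ [L2.filter (fun x => decide (0 < x))] else acc2) acc
      = acc ++ pvGroups L1 := by
  induction L1 generalizing acc with
  | nil => simp [pvGroups]
  | cons h t ih =>
    rw [List.foldl_cons]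
    by_cases hs : (0 : Int) < h.sum
    · rw [if_pos hs, ih]; simp [pvGroups, hs]
    · rw [if_neg hs, ih]; simp [pvGroups, hs]

theorem pv_outer_first (q : List (List (List Int))) (acc : List (List Int)) :
    q.foldl (fun acc L1 =>
        acc ++ [L1.foldl (fun ap L2 => if 0 < L2.sum then ap ++ L2.filter (fun x => decide (0 < x)) else ap) []]) acc
      = acc ++ q.map (fun L1 => (pvGroups L1).flatten) := by
  induction q generalizing acc with
  | nil => simp
  | cons h t ih => rw [List.foldl_cons, ih, pv_inner_first]; simp

theorem pv_outer_second (q : List (List (List Int))) (acc : List (List Int)) :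
    q.foldl (fun acc L1 =>
        L1.foldl (fun acc2 L2 => if 0 < L2.sum then acc2 ++ [L2.filter (fun x => decide (0 < x))] else acc2) acc) acc
      = acc ++ q.flatMap pvGroups := by
  induction q generalizing acc with
  | nil => simp
  | cons h t ih => rw [List.foldl_cons, pv_inner_second, ih]; simp

theorem pv_A_char (L : List (List (List Int))) (n : Int) :
    f3_3 L n = ((L.filter (fun L1 => decide (n ≤ (L1.length : Int)))).map (fun L1 => (pvGroups L1).flatten),
                (L.filter (fun L1 => decide (n ≤ (L1.length : Int)))).flatMap pvGroups) := by
  show ((L.filter (fun L1 => decide (n ≤ (L1.length : Int)))).foldl (fun acc L1 =>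
      acc ++ [L1.foldl (fun ap L2 => if 0 < L2.sum then ap ++ L2.filter (fun x => decide (0 < x)) else ap) []]) [],
     (L.filter (fun L1 => decide (n ≤ (L1.length : Int)))).foldl (fun acc L1 =>
      L1.foldl (fun acc2 L2 => if 0 < L2.sum then acc2 ++ [L2.filter (fun x => decide (0 < x))] else acc2) acc) []) = _
  rw [pv_outer_first, pv_outer_second]; simp

-- B's first pass returns (acc.1 ++ flat groups, acc.2 ++ group counts)
theorem pv_B_pass1 (L : List (List (List Int))) (n : Int) (acc : List (List Int) × List Int) :
    L.foldl (fun (sc : List (List Int) × List Int) L1 =>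
      if n ≤ (L1.length : Int) then
        let start := sc.1.length
        let second := L1.foldl (fun s L2 =>
            if 0 < L2.sum then s ++ [L2.filter (fun x => decide (0 < x))] else s) sc.1
        (second, sc.2 ++ [((second.length : Int) - (start : Int))])
      else sc) acc
    = (acc.1 ++ (L.filter (fun L1 => decide (n ≤ (L1.length : Int)))).flatMap pvGroups,
       acc.2 ++ (L.filter (fun L1 => decide (n ≤ (L1.length : Int)))).map (fun L1 => ((pvGroups L1).length : Int))) := by
  induction L generalizing acc with
  | nil => simp
  | cons h t ih =>
    rw [List.foldl_cons]
    by_cases hl : n ≤ (h.length : Int)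
    · simp only [if_pos hl]
      rw [pv_inner_second, ih]
      simp [hl]
    · rw [if_neg hl, ih]; simp [hl]

theorem pv_chunk (g : List (List Int)) (acc : List Int) :
    g.foldl (fun ch x => ch ++ x) acc = acc ++ g.flatten := by
  induction g generalizing acc with
  | nil => simp
  | cons h t ih => rw [List.foldl_cons, ih]; simp

-- B's second pass: consuming counts gs.map length from rest = gs.flatMap id yields the flattened groups
theorem pv_B_pass2 (gs : List (List (List Int))) (acc : List (List Int)) :
    (gs.map (fun g => ((g.length : Nat) : Int))).foldl
      (fun (fr : List (List Int) × List (List Int)) c =>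
        let chunk := (PySem.List.slice fr.2 none (some c)).foldl (fun ch g => ch ++ g) []
        (fr.1 ++ [chunk], PySem.List.slice fr.2 (some c) none)) (acc, gs.flatMap id)
    = (acc ++ gs.map (fun g => g.flatten), []) := by
  induction gs generalizing acc with
  | nil => simp
  | cons g t ih =>
    rw [List.map_cons, List.foldl_cons]
    have h1 : PySem.List.slice ((g :: t).flatMap id) none (some ((g.length : Nat) : Int))
        = g := by
      rw [PySem.List.slice_to_natCast]
      simp [List.flatMap_cons]
    have h2 : PySem.List.slice ((g :: t).flatMap id) (some ((g.length : Nat) : Int)) none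
        = t.flatMap id := by
      rw [PySem.List.slice_from_natCast]
      simp [List.flatMap_cons]
    have hstep :
        (let chunk := (PySem.List.slice ((acc, (g :: t).flatMap id) : List (List Int) × List (List Int)).2
            none (some ((g.length : Nat) : Int))).foldl (fun ch g => ch ++ g) []
         (((acc, (g :: t).flatMap id) : List (List Int) × List (List Int)).1 ++ [chunk],
          PySem.List.slice ((acc, (g :: t).flatMap id) : List (List Int) × List (List Int)).2
            (some ((g.length : Nat) : Int)) none))
        = ((acc ++ [g.flatten], t.flatMap id) : List (List Int) × List (List Int)) := by
      simp only [h1, h2, pv_chunk, List.nil_append]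
    rw [hstep, ih]
    simp

theorem pv_B_char (L : List (List (List Int))) (n : Int) :
    f3_3_alt L n = ((L.filter (fun L1 => decide (n ≤ (L1.length : Int)))).map (fun L1 => (pvGroups L1).flatten),
                    (L.filter (fun L1 => decide (n ≤ (L1.length : Int)))).flatMap pvGroups) := by
  unfold f3_3_alt
  rw [pv_B_pass1]
  simp only [List.nil_append]
  have : (L.filter (fun L1 => decide (n ≤ (L1.length : Int)))).map (fun L1 => ((pvGroups L1).length : Int))
      = ((L.filter (fun L1 => decide (n ≤ (L1.length : Int)))).map pvGroups).map (fun g => ((g.length : Nat) : Int)) := by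
    simp [List.map_map, Function.comp]
  rw [this]
  have hflat : (L.filter (fun L1 => decide (n ≤ (L1.length : Int)))).flatMap pvGroups
      = ((L.filter (fun L1 => decide (n ≤ (L1.length : Int)))).map pvGroups).flatMap id := by
    simp [List.flatMap_map]
  rw [hflat, pv_B_pass2]
  simp [List.map_map, Function.comp]

-- ===== VERDICT =====
theorem f3_3_spec : Claim_equal_f3_3 := by
  intro L n _
  unfold Spec_f3_3
  rw [pv_A_char, pv_B_char]
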